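-- pv_equiv track=rewrite | github.com/sergiooncode/project_euler_problems | euler_problem2/euler_problem2.py | generate
-- ===== SOURCE A (Python) =====
-- def generate(max_of_terms):
--     sequence = [1, 2]
--     iter = 0
--     while sequence[-1] < max_of_terms:
--         next_item = sequence[iter] + sequence[iter + 1]
--         sequence.append(next_item)
--         iter = iter + 1
--     sequence.pop()
--     return sequence
-- ===== SOURCE B (Python) =====
-- def _fib(n):
--     # fast doubling: returns (F(n), F(n+1)) with F(0)=0, F(1)=1
--     if n == 0:
--         return (0, 1)
--     a, b = _fib(n >> 1)
--     c = a * (2 * b - a)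
--     d = a * a + b * b
--     if n & 1:
--         return (d, c + d)
--     return (c, d)
--
--
-- def generate(max_of_terms):
--     result = [1]
--     k = 3  # F(3) = 2 is the next candidate term
--     f = _fib(k)[0]
--     while f < max_of_terms:
--         result.append(f)
--         k += 1
--         f = _fib(k)[0]
--     return result
-- ===== Notes on version B (the rewrite author's own statement) =====
-- stated objective: alternative
-- what changed: Instead of extending a list with the additive recurrence and popping the overshoot, B computes each candidate term independently from its index by the fast-doubling Fibonacci identities (recursive halving) and appends it only while it is below the limit.
import Mathlib
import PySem

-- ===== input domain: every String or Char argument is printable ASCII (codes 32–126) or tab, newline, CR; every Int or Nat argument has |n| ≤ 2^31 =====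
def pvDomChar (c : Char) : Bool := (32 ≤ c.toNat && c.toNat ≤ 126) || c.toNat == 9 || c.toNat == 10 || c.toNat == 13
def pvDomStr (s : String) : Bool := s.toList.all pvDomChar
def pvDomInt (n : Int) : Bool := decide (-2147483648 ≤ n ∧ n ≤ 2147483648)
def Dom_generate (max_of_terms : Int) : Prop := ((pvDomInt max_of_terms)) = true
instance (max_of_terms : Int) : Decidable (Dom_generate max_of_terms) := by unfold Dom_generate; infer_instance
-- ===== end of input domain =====

-- B is a different algorithm: each candidate term is computed independently from its
-- index by recursive fast-doubling Fibonacci identities, instead of extending a list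
-- with the additive recurrence and popping the overshoot; return values are proved equal.

-- ===== PORT A =====
-- Loop invariant carried as a Prop argument (needed only for termination of the while loop):
-- the sequence ends in [a, b] with 1 ≤ a < b and iter indexes a.
def InvA (seq : List Int) (iter : Int) : Prop :=
  ∃ s a b : _, seq = s ++ [a, b] ∧ 1 ≤ a ∧ a < b ∧ iter = (s.length : Int)

-- the while loop of A: state = (sequence, iter)
def loopA (m : Int) (seq : List Int) (iter : Int) (hI : InvA seq iter) : List Int :=
  if h : (PySem.List.pyGet? seq (-1)).getD 0 < m then
    -- next_item = sequence[iter] + sequence[iter + 1]; sequence.append(next_item); iter += 1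
    let next_item := (PySem.List.pyGet? seq iter).getD 0 + (PySem.List.pyGet? seq (iter + 1)).getD 0
    loopA m (seq ++ [next_item]) (iter + 1) (by
      obtain ⟨s, a, b, rfl, ha, hab, rfl⟩ := hI
      have e3 : PySem.List.pyGet? (s ++ [a, b]) ((s.length : Int)) = some a := by
        simpa using PySem.List.pyGet?_append_length s a [b]
      have e4 : PySem.List.pyGet? (s ++ [a, b]) ((s.length : Int) + 1) = some b := by
        simpa using PySem.List.pyGet?_append_right s [a, b] 1
      refine ⟨s ++ [a], b, a + b, ?_, by omega, by omega, by simp⟩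
      simp only [next_item, e3, e4, Option.getD_some]
      simp)
  else
    seq.dropLast  -- sequence.pop(); return sequence
termination_by (m - (PySem.List.pyGet? seq (-1)).getD 0).toNat
decreasing_by
  obtain ⟨s, a, b, rfl, ha, hab, rfl⟩ := hI
  have e1 : PySem.List.pyGet? (s ++ [a, b]) (-1) = some b := by
    have : s ++ [a, b] = (s ++ [a]) ++ [b] := by simp
    rw [this, PySem.List.pyGet?_neg_one_append_singleton]
  have e2 : PySem.List.pyGet? ((s ++ [a, b]) ++ [a + b]) (-1) = some (a + b) :=
    PySem.List.pyGet?_neg_one_append_singleton _ _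
  have e3 : PySem.List.pyGet? (s ++ [a, b]) ((s.length : Int)) = some a := by
    simpa using PySem.List.pyGet?_append_length s a [b]
  have e4 : PySem.List.pyGet? (s ++ [a, b]) ((s.length : Int) + 1) = some b := by
    have := PySem.List.pyGet?_append_right s [a, b] 1
    simpa using this
  rw [e1] at h
  simp only [Option.getD_some] at h
  simp only [e1, e2, e3, e4, Option.getD_some]
  omega

def generate (max_of_terms : Int) : List Int :=
  loopA max_of_terms [1, 2] 0 ⟨[], 1, 2, by simp, by norm_num, by norm_num, by simp⟩

-- ===== PORT B =====
-- _fib: fast doubling, returns (F(n), F(n+1)); n is Python's nonnegative recursion argument.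
def fd (n : Nat) : Int × Int :=
  if h : n = 0 then (0, 1)
  else
    let p := fd (n >>> 1)
    let a := p.1
    let b := p.2
    let c := a * (2 * b - a)
    let d := a * a + b * b
    if n &&& 1 = 1 then (d, c + d) else (c, d)
termination_by n
decreasing_by
  simpa [Nat.shiftRight_eq_div_pow] using Nat.div_lt_self (Nat.pos_of_ne_zero h) one_lt_two

-- correctness of fast doubling (the port's while loop needs it for termination)
lemma fd_eq : ∀ n : Nat, fd n = ((Nat.fib n : Int), (Nat.fib (n + 1) : Int)) := by
  intro n
  induction n using Nat.strong_induction_on with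
  | _ n ih =>
    rw [fd]
    by_cases h : n = 0
    · simp [h]
    · simp only [h, dif_neg, not_false_iff]
      have hdiv : n >>> 1 = n / 2 := by simp [Nat.shiftRight_eq_div_pow]
      have hlt : n / 2 < n := Nat.div_lt_self (Nat.pos_of_ne_zero h) one_lt_two
      have ihd := ih (n >>> 1) (by omega)
      rw [hdiv] at ihd ⊢
      rw [ihd]
      have hand : n &&& 1 = n % 2 := Nat.and_one_is_mod n
      by_cases hp : n &&& 1 = 1
      · -- n odd: n = 2*q + 1
        have hodd : n % 2 = 1 := by omega
        obtain ⟨q, rfl⟩ : ∃ q, n = 2 * q + 1 := ⟨n / 2, by omega⟩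
        have e : (2 * q + 1) / 2 = q := by omega
        simp only [hp, if_pos, e, Prod.mk.injEq]
        have h2m1 : Nat.fib (2 * q + 1) = Nat.fib (q + 1) ^ 2 + Nat.fib q ^ 2 :=
          Nat.fib_two_mul_add_one q
        have e2 : 2 * q + 1 + 1 = 2 * (q + 1) := by ring
        have h2m2 : Nat.fib (2 * (q + 1)) = Nat.fib (q + 1) * (2 * Nat.fib (q + 1 + 1) - Nat.fib (q + 1)) :=
          Nat.fib_two_mul (q + 1)
        have hle : Nat.fib (q + 1) ≤ 2 * Nat.fib (q + 1 + 1) :=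
          le_trans Nat.fib_le_fib_succ (by omega)
        refine ⟨?_, ?_⟩
        · rw [h2m1]; push_cast; ring
        · rw [e2, h2m2]
          push_cast [Nat.cast_sub hle, Nat.fib_add_two]
          rw [Nat.cast_sub (by omega : Nat.fib (q + 1) ≤ 2 * (Nat.fib q + Nat.fib (q + 1)))]
          push_cast
          ring
      · -- n even: n = 2*q
        have hodd : n % 2 = 0 := by omega
        obtain ⟨q, rfl⟩ : ∃ q, n = 2 * q := ⟨n / 2, by omega⟩
        have e : (2 * q) / 2 = q := by omega
        simp only [hp, if_neg, not_false_iff, e, Prod.mk.injEq]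
        have h2m : Nat.fib (2 * q) = Nat.fib q * (2 * Nat.fib (q + 1) - Nat.fib q) :=
          Nat.fib_two_mul q
        have h2m1 : Nat.fib (2 * q + 1) = Nat.fib (q + 1) ^ 2 + Nat.fib q ^ 2 :=
          Nat.fib_two_mul_add_one q
        have hle : Nat.fib q ≤ 2 * Nat.fib (q + 1) :=
          le_trans Nat.fib_le_fib_succ (by omega)
        refine ⟨?_, ?_⟩
        · rw [h2m]
          push_cast [Nat.cast_sub hle]
          ring
        · rw [h2m1]; push_cast; ring

-- lower bound used for the while loop's termination: n ≤ F(n+2)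
lemma le_fib_add_two : ∀ n : Nat, n ≤ Nat.fib (n + 2) := by
  intro n
  induction n with
  | zero => simp
  | succ k ih =>
    have he : k + 1 + 2 = k + 3 := by omega
    rw [he]
    have hsum : Nat.fib (k + 3) = Nat.fib (k + 1) + Nat.fib (k + 2) := Nat.fib_add_two
    have h1 : 1 ≤ Nat.fib (k + 1) := Nat.fib_pos.mpr (by omega)
    omega

-- the while loop of B: state = (result, k); f = _fib(k)[0]
def loopB (m : Int) (k : Nat) (result : List Int) (hk : 3 ≤ k) : List Int :=
  let f := (fd k).1
  if h : f < m then
    loopB m (k + 1) (result ++ [f]) (by omega)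
  else
    result
termination_by (m + 2 - (k : Int)).toNat
decreasing_by
  have h' : (fd k).1 < m := h
  have hf : (fd k).1 = (Nat.fib k : Int) := by rw [fd_eq]
  have hlow : (k : Nat) - 2 ≤ Nat.fib k := by
    have := le_fib_add_two (k - 2)
    have hk2 : k - 2 + 2 = k := by omega
    rwa [hk2] at this
  rw [hf] at h'
  have : ((k : Int)) - 2 ≤ (Nat.fib k : Int) := by omega
  omega

def generate_alt (max_of_terms : Int) : List Int :=
  loopB max_of_terms 3 [1] (by norm_num)

-- ===== PRECONDITION & SPEC =====
def Spec_generate (max_of_terms : Int) (out : List Int) : Prop := out = generate_alt max_of_terms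
instance (max_of_terms : Int) (out : List Int) : Decidable (Spec_generate max_of_terms out) := by unfold Spec_generate; infer_instance

-- ===== CLAIM (what is proved, stated in full; the proofs are below) =====
def Claim_equal_generate : Prop := ∀ (max_of_terms : Int), Dom_generate max_of_terms → Spec_generate max_of_terms (generate max_of_terms)

-- ===== LEMMAS AND PROOFS =====

-- Alignment of the two loop states: A's sequence = s ++ [F(k-1), F(k)] ↔ B's result = s ++ [F(k-1)].
lemma loopA_eq_loopB (m : Int) : ∀ N (s : List Int) (k : Nat) (hk : 3 ≤ k)
    (hI : InvA (s ++ [(Nat.fib (k - 1) : Int), (Nat.fib k : Int)]) (s.length : Int)),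
    N = (m + 2 - (k : Int)).toNat →
    loopA m (s ++ [(Nat.fib (k - 1) : Int), (Nat.fib k : Int)]) (s.length : Int) hI
      = loopB m k (s ++ [(Nat.fib (k - 1) : Int)]) hk := by
  intro N
  induction N using Nat.strong_induction_on with
  | _ N ih =>
    intro s k hk hI hN
    have e1 : PySem.List.pyGet? (s ++ [(Nat.fib (k - 1) : Int), (Nat.fib k : Int)]) (-1)
        = some (Nat.fib k : Int) := by
      have : s ++ [(Nat.fib (k - 1) : Int), (Nat.fib k : Int)]
          = (s ++ [(Nat.fib (k - 1) : Int)]) ++ [(Nat.fib k : Int)] := by simp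
      rw [this, PySem.List.pyGet?_neg_one_append_singleton]
    have e3 : PySem.List.pyGet? (s ++ [(Nat.fib (k - 1) : Int), (Nat.fib k : Int)]) ((s.length : Int))
        = some (Nat.fib (k - 1) : Int) := by
      simpa using PySem.List.pyGet?_append_length s (Nat.fib (k - 1) : Int) [(Nat.fib k : Int)]
    have e4 : PySem.List.pyGet? (s ++ [(Nat.fib (k - 1) : Int), (Nat.fib k : Int)]) ((s.length : Int) + 1)
        = some (Nat.fib k : Int) := by
      simpa using PySem.List.pyGet?_append_right s [(Nat.fib (k - 1) : Int), (Nat.fib k : Int)] 1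
    have hfd : (fd k).1 = (Nat.fib k : Int) := by rw [fd_eq]
    rw [loopA.eq_def, loopB.eq_def]
    simp only [e1, e3, e4, hfd, Option.getD_some]
    by_cases hbm : (Nat.fib k : Int) < m
    · simp only [hbm, dif_pos]
      have hsum : (Nat.fib (k - 1) : Int) + (Nat.fib k : Int) = (Nat.fib (k + 1) : Int) := by
        have hk1 : k - 1 + 2 = k + 1 := by omega
        have := Nat.fib_add_two (n := k - 1)
        rw [hk1] at this
        have hk2 : k - 1 + 1 = k := by omega
        rw [hk2] at this
        push_cast [this]; ring
      have hcongr : ∀ (u v : List Int) (i j : Int) (hu : InvA u i) (hv : InvA v j),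
          u = v → i = j → loopA m u i hu = loopA m v j hv := by
        intro u v i j hu hv he hi; subst he; subst hi; rfl
      have hshape : (s ++ [(Nat.fib (k - 1) : Int), (Nat.fib k : Int)])
            ++ [(Nat.fib (k - 1) : Int) + (Nat.fib k : Int)]
          = (s ++ [(Nat.fib (k - 1) : Int)]) ++ [(Nat.fib (k + 1 - 1) : Int), (Nat.fib (k + 1) : Int)] := by
        rw [hsum]
        have : k + 1 - 1 = k := by omega
        rw [this]
        simp
      have hI'' : InvA ((s ++ [(Nat.fib (k - 1) : Int)]) ++ [(Nat.fib (k + 1 - 1) : Int), (Nat.fib (k + 1) : Int)])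
          (((s ++ [(Nat.fib (k - 1) : Int)]).length : Int)) := by
        refine ⟨s ++ [(Nat.fib (k - 1) : Int)], _, _, rfl, ?_, ?_, rfl⟩
        · have : k + 1 - 1 = k := by omega
          rw [this]
          exact_mod_cast Nat.fib_pos.mpr (by omega)
        · have h1 : k + 1 - 1 = k := by omega
          rw [h1]
          exact_mod_cast Nat.fib_lt_fib_succ (by omega)
      rw [hcongr _ _ ((s.length : Int) + 1) (((s ++ [(Nat.fib (k - 1) : Int)]).length : Int))
          _ hI'' hshape (by simp)]
      have hlow : (k : Nat) - 2 ≤ Nat.fib k := by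
        have := le_fib_add_two (k - 2)
        have hk2 : k - 2 + 2 = k := by omega
        rwa [hk2] at this
      exact ih (m + 2 - ((k : Int) + 1)).toNat (by omega) (s ++ [(Nat.fib (k - 1) : Int)])
        (k + 1) (by omega) hI'' (by push_cast; ring_nf)
    · simp only [hbm, dif_neg, not_false_iff]
      have : s ++ [(Nat.fib (k - 1) : Int), (Nat.fib k : Int)]
          = (s ++ [(Nat.fib (k - 1) : Int)]) ++ [(Nat.fib k : Int)] := by simp
      rw [this, List.dropLast_concat]

-- ===== VERDICT (by name: the statement is the Claim_ definition above) =====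
theorem generate_spec : Claim_equal_generate := by
  intro m _
  unfold Spec_generate generate generate_alt
  have h := loopA_eq_loopB m (m + 2 - 3).toNat [] 3 (by norm_num)
    (by exact ⟨[], 1, 2, by norm_num [Nat.fib], by norm_num, by norm_num, by simp⟩) (by push_cast; ring_nf)
  simpa [Nat.fib] using h
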